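-- pv_equiv track=rewrite | github.com/HritwikSinghal/NLP | Base_Modules/d_relation_word_len_freq.py | get_word_lengths
-- ===== SOURCE A (Python) =====
-- def get_word_lengths(freq: dict):
--     word_len = {}
--
--     for k in freq:
--         if len(k) not in word_len:
--             word_len[len(k)] = freq[k]
--         else:
--             word_len[len(k)] += freq[k]
--
--     return word_len
-- ===== SOURCE B (Python) =====
-- def get_word_lengths(freq: dict):
--     # two-phase: lengths in first-occurrence order, then a per-length filter-and-sum pass
--     lengths = list(dict.fromkeys(len(k) for k in freq))
--     return {L: sum(v for k, v in freq.items() if len(k) == L) for L in lengths}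
-- ===== Notes on version B (the rewrite author's own statement) =====
-- stated objective: alternative
-- what changed: Replaces the single-pass running-accumulator dict update with a two-phase pipeline: dedup the key lengths in first-occurrence order, then compute each length's total by an independent filter-and-sum pass over the items.
import Mathlib
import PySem

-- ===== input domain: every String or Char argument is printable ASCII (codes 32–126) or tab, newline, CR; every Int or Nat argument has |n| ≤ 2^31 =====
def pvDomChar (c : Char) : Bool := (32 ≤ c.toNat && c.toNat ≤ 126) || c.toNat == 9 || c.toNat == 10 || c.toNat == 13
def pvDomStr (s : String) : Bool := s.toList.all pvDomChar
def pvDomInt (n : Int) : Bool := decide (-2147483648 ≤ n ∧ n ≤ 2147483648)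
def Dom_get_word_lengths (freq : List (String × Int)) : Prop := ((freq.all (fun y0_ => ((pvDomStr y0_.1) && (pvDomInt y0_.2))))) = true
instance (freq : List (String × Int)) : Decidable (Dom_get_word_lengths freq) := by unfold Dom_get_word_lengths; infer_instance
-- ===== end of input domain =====

-- B is a structurally different two-phase re-implementation (dedup lengths, then per-length filter-and-sum), same values.
-- ===== PORT A =====
-- 'for k in freq: … freq[k]' — under Pre_ (unique keys, as in any Python dict) freq[k] is the pair's own value kv.2
def get_word_lengths (freq : List (String × Int)) : List (Int × Int) :=
  (freq.foldl (fun wl kv =>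
      if wl.contains (PySem.Str.len kv.1) = false then
        wl.insert (PySem.Str.len kv.1) kv.2
      else
        wl.insert (PySem.Str.len kv.1) (wl.getD (PySem.Str.len kv.1) 0 + kv.2))
    (PySem.Dict.empty : PySem.Dict Int Int)).items

-- ===== PORT B =====
def get_word_lengths_alt (freq : List (String × Int)) : List (Int × Int) :=
  let lengths := PySem.List.dedup (freq.map (fun kv => PySem.Str.len kv.1))
  lengths.map (fun L =>
    (L, ((freq.filter (fun kv => PySem.Str.len kv.1 == L)).map (fun kv => kv.2)).sum))

-- ===== PRECONDITION & SPEC =====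
-- Pre_ excludes duplicate first components only: a Python dict cannot hold duplicate keys at all.
def Pre_get_word_lengths (freq : List (String × Int)) : Prop := (freq.map Prod.fst).Nodup
instance (freq : List (String × Int)) : Decidable (Pre_get_word_lengths freq) := by unfold Pre_get_word_lengths; infer_instance
def pvWitness_get_word_lengths : (List (String × Int)) := [("ab", 3), ("c", 1), ("de", 2)]
def Spec_get_word_lengths (freq : List (String × Int)) (out : List (Int × Int)) : Prop := out = get_word_lengths_alt freq
instance (freq : List (String × Int)) (out : List (Int × Int)) : Decidable (Spec_get_word_lengths freq out) := by unfold Spec_get_word_lengths; infer_instance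

-- ===== CLAIM (what is proved, stated in full; the proofs are below) =====
def Claim_equal_get_word_lengths : Prop := ∀ (freq : List (String × Int)), Dom_get_word_lengths freq → Pre_get_word_lengths freq → Spec_get_word_lengths freq (get_word_lengths freq)

-- ===== LEMMAS AND PROOFS =====

-- A's loop step equals the uniform 'insert key (getD key 0 + v)' step (the fresh-key branch starts from getD = 0).
lemma gwl_step_eq (wl : PySem.Dict Int Int) (kv : String × Int) :
    (if wl.contains (PySem.Str.len kv.1) = false then
        wl.insert (PySem.Str.len kv.1) kv.2
      else
        wl.insert (PySem.Str.len kv.1) (wl.getD (PySem.Str.len kv.1) 0 + kv.2))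
    = wl.insert (PySem.Str.len kv.1) (wl.getD (PySem.Str.len kv.1) 0 + kv.2) := by
  by_cases h : wl.contains (PySem.Str.len kv.1) = false
  · rw [if_pos h, PySem.Dict.getD_of_not_contains wl 0 h, zero_add]
  · rw [if_neg h]

-- lookup after the accumulation loop: the starting value plus the sum of the matching values
lemma gwl_getD_loop (l : List (String × Int)) (d : PySem.Dict Int Int) (L : Int) :
    (l.foldl (fun wl kv => wl.insert (PySem.Str.len kv.1) (wl.getD (PySem.Str.len kv.1) 0 + kv.2)) d).getD L 0
      = d.getD L 0 + ((l.filter (fun kv => PySem.Str.len kv.1 == L)).map (fun kv => kv.2)).sum := by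
  induction l generalizing d with
  | nil => simp
  | cons kv t ih =>
    rw [List.foldl_cons, ih, List.filter_cons]
    by_cases h : PySem.Str.len kv.1 = L
    · rw [if_pos (by exact beq_iff_eq.mpr h), List.map_cons, List.sum_cons, h,
        PySem.Dict.getD_insert_self]
      ring
    · rw [if_neg (by simpa using h), PySem.Dict.getD_insert_of_ne d _ _ (fun hc => h (Eq.symm hc))]

-- ===== VERDICT (by name: the statement is the Claim_ definition above) =====
theorem get_word_lengths_spec : Claim_equal_get_word_lengths := by
  intro freq _ _
  unfold Spec_get_word_lengths get_word_lengths get_word_lengths_alt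
  have hstep : freq.foldl (fun wl kv =>
      if wl.contains (PySem.Str.len kv.1) = false then
        wl.insert (PySem.Str.len kv.1) kv.2
      else
        wl.insert (PySem.Str.len kv.1) (wl.getD (PySem.Str.len kv.1) 0 + kv.2))
      (PySem.Dict.empty : PySem.Dict Int Int)
    = freq.foldl (fun wl kv => wl.insert (PySem.Str.len kv.1) (wl.getD (PySem.Str.len kv.1) 0 + kv.2))
      (PySem.Dict.empty : PySem.Dict Int Int) := by
    congr 1
    funext wl kv
    exact gwl_step_eq wl kv
  rw [hstep]
  set D := freq.foldl (fun wl kv => wl.insert (PySem.Str.len kv.1) (wl.getD (PySem.Str.len kv.1) 0 + kv.2))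
      (PySem.Dict.empty : PySem.Dict Int Int) with hD
  have hnd : D.keys.Nodup := by
    rw [hD]
    exact PySem.Dict.nodup_keys_foldl_insert_key freq (fun kv => PySem.Str.len kv.1) _ _ (by simp)
  have hkeys : D.keys = PySem.List.dedup (freq.map (fun kv => PySem.Str.len kv.1)) := by
    rw [hD, PySem.Dict.keys_foldl_insert_key]
    simp [PySem.Set.update, PySem.List.dedup_eq_ofList, PySem.Set.ofList_eq_foldl]
  rw [PySem.Dict.items_eq_map_keys D hnd 0, hkeys]
  apply List.map_congr_left
  intro L _
  rw [hD, gwl_getD_loop]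
  simp
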